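-- pv_equiv track=rewrite | github.com/luomor-ai/openclaw-skills | skills/hhjsnsnsk/nba-today-pulse/tools/nba_player_names.py | localize_player_line
-- ===== SOURCE A (Python) =====
-- PLAYER_DISPLAY_ZH = {
--     "Anthony Davis": "安东尼·戴维斯",
--     "Anthony Edwards": "安东尼·爱德华兹",
--     "Ausar Thompson": "奥萨尔·汤普森",
--     "Brandon Miller": "布兰登·米勒",
--     "Cade Cunningham": "凯德·坎宁安",
--     "De'Aaron Fox": "达龙·福克斯",
--     "DeMar DeRozan": "德玛尔·德罗赞",
--     "Devin Vassell": "德文·瓦塞尔",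
--     "Domantas Sabonis": "多曼塔斯·萨博尼斯",
--     "Donte DiVincenzo": "唐特·迪文琴佐",
--     "Duncan Robinson": "邓肯·罗宾逊",
--     "Jalen Brunson": "杰伦·布伦森",
--     "Jalen Duren": "杰伦·杜伦",
--     "Jaylen Brown": "杰伦·布朗",
--     "Jayson Tatum": "杰森·塔图姆",
--     "Joel Embiid": "乔尔·恩比德",
--     "Julius Randle": "朱利叶斯·兰德尔",
--     "Karl-Anthony Towns": "卡尔-安东尼·唐斯",
--     "LaMelo Ball": "拉梅洛·鲍尔",
--     "LeBron James": "勒布朗·詹姆斯",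
--     "Malik Monk": "马利克·蒙克",
--     "Mark Williams": "马克·威廉姆斯",
--     "Miles Bridges": "迈尔斯·布里奇斯",
--     "Mike Conley": "迈克·康利",
--     "OG Anunoby": "OG·阿奴诺比",
--     "Paul George": "保罗·乔治",
--     "Rudy Gobert": "鲁迪·戈贝尔",
--     "Stephen Curry": "斯蒂芬·库里",
--     "Stephon Castle": "斯蒂芬·卡斯尔",
--     "Tobias Harris": "托拜厄斯·哈里斯",
--     "Tyrese Maxey": "泰瑞斯·马克西",
--     "Victor Wembanyama": "维克托·文班亚马",
-- }
--
-- def display_player_name(name: str | None, lang: str = "en") -> str: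
--     if not name:
--         return ""
--     text = str(name).strip()
--     if lang != "zh":
--         return text
--     return PLAYER_DISPLAY_ZH.get(text, text)
--
-- def localize_player_line(text: str | None, lang: str = "en") -> str:
--     if not text:
--         return ""
--     raw = str(text)
--     if lang != "zh":
--         return raw
--     delimiter_positions = [raw.find(token) for token in (" - ", " | ", " (", ": ")]
--     candidates = [position for position in delimiter_positions if position > 0]
--     split_at = min(candidates) if candidates else len(raw)
--     name = raw[:split_at].strip()
--     localized = display_player_name(name, lang)
--     if localized == name:
--         return raw
--     return f"{localized}{raw[split_at:]}"
-- ===== SOURCE B (Python) =====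
-- PLAYER_DISPLAY_ZH = {
--     "Anthony Davis": "安东尼·戴维斯",
--     "Anthony Edwards": "安东尼·爱德华兹",
--     "Ausar Thompson": "奥萨尔·汤普森",
--     "Brandon Miller": "布兰登·米勒",
--     "Cade Cunningham": "凯德·坎宁安",
--     "De'Aaron Fox": "达龙·福克斯",
--     "DeMar DeRozan": "德玛尔·德罗赞",
--     "Devin Vassell": "德文·瓦塞尔",
--     "Domantas Sabonis": "多曼塔斯·萨博尼斯",
--     "Donte DiVincenzo": "唐特·迪文琴佐",
--     "Duncan Robinson": "邓肯·罗宾逊",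
--     "Jalen Brunson": "杰伦·布伦森",
--     "Jalen Duren": "杰伦·杜伦",
--     "Jaylen Brown": "杰伦·布朗",
--     "Jayson Tatum": "杰森·塔图姆",
--     "Joel Embiid": "乔尔·恩比德",
--     "Julius Randle": "朱利叶斯·兰德尔",
--     "Karl-Anthony Towns": "卡尔-安东尼·唐斯",
--     "LaMelo Ball": "拉梅洛·鲍尔",
--     "LeBron James": "勒布朗·詹姆斯",
--     "Malik Monk": "马利克·蒙克",
--     "Mark Williams": "马克·威廉姆斯",
--     "Miles Bridges": "迈尔斯·布里奇斯",
--     "Mike Conley": "迈克·康利",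
--     "OG Anunoby": "OG·阿奴诺比",
--     "Paul George": "保罗·乔治",
--     "Rudy Gobert": "鲁迪·戈贝尔",
--     "Stephen Curry": "斯蒂芬·库里",
--     "Stephon Castle": "斯蒂芬·卡斯尔",
--     "Tobias Harris": "托拜厄斯·哈里斯",
--     "Tyrese Maxey": "泰瑞斯·马克西",
--     "Victor Wembanyama": "维克托·文班亚马",
-- }
--
--
-- _DELIMITERS = (" - ", " | ", " (", ": ")
--
-- def localize_player_line(text, lang="en"):
--     if not text:
--         return ""
--     raw = str(text)
--     if lang != "zh":
--         return raw
--     split_at = len(raw)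
--     for i in range(1, len(raw)):
--         if raw.startswith(_DELIMITERS, i):
--             split_at = i
--             break
--     name = raw[:split_at].strip()
--     localized = PLAYER_DISPLAY_ZH.get(name, name)
--     if localized == name:
--         return raw
--     return localized + raw[split_at:]
-- ===== Notes on version B (the rewrite author's own statement) =====
-- stated objective: alternative
-- what changed: Replaces the four-find()-plus-filter-plus-min delimiter search with a single early-stopping left-to-right scan (startswith at each index from 1) and drops the display_player_name indirection in favour of a direct dict lookup on the already-stripped name.
import Mathlib
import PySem

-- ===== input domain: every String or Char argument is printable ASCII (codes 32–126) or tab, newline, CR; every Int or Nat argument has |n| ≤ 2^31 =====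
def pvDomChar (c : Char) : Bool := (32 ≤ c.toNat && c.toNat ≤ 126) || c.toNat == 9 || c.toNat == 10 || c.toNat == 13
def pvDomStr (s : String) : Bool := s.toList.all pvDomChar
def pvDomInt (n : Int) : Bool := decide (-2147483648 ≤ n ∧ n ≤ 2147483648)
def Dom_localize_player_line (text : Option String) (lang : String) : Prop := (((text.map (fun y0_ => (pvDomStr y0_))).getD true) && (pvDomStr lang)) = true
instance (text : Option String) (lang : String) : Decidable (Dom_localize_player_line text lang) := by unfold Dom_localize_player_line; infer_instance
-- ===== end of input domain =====

-- B replaces the four-find()+filter+min delimiter search by one early-stopping left-to-right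
-- startswith scan and looks the stripped name up in the dict directly (objective: alternative).

-- ===== PORT A =====
def PLAYER_DISPLAY_ZH : PySem.Dict String String := PySem.Dict.ofList [
  ("Anthony Davis", "安东尼·戴维斯"),
  ("Anthony Edwards", "安东尼·爱德华兹"),
  ("Ausar Thompson", "奥萨尔·汤普森"),
  ("Brandon Miller", "布兰登·米勒"),
  ("Cade Cunningham", "凯德·坎宁安"),
  ("De'Aaron Fox", "达龙·福克斯"),
  ("DeMar DeRozan", "德玛尔·德罗赞"),
  ("Devin Vassell", "德文·瓦塞尔"),
  ("Domantas Sabonis", "多曼塔斯·萨博尼斯"),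
  ("Donte DiVincenzo", "唐特·迪文琴佐"),
  ("Duncan Robinson", "邓肯·罗宾逊"),
  ("Jalen Brunson", "杰伦·布伦森"),
  ("Jalen Duren", "杰伦·杜伦"),
  ("Jaylen Brown", "杰伦·布朗"),
  ("Jayson Tatum", "杰森·塔图姆"),
  ("Joel Embiid", "乔尔·恩比德"),
  ("Julius Randle", "朱利叶斯·兰德尔"),
  ("Karl-Anthony Towns", "卡尔-安东尼·唐斯"),
  ("LaMelo Ball", "拉梅洛·鲍尔"),
  ("LeBron James", "勒布朗·詹姆斯"),
  ("Malik Monk", "马利克·蒙克"),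
  ("Mark Williams", "马克·威廉姆斯"),
  ("Miles Bridges", "迈尔斯·布里奇斯"),
  ("Mike Conley", "迈克·康利"),
  ("OG Anunoby", "OG·阿奴诺比"),
  ("Paul George", "保罗·乔治"),
  ("Rudy Gobert", "鲁迪·戈贝尔"),
  ("Stephen Curry", "斯蒂芬·库里"),
  ("Stephon Castle", "斯蒂芬·卡斯尔"),
  ("Tobias Harris", "托拜厄斯·哈里斯"),
  ("Tyrese Maxey", "泰瑞斯·马克西"),
  ("Victor Wembanyama", "维克托·文班亚马")]

def display_player_name (name : String) (lang : String) : String :=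
  if name = "" then ""
  else
    let text := PySem.Str.strip name
    if lang ≠ "zh" then text
    else PySem.Dict.getD PLAYER_DISPLAY_ZH text text

def localize_player_line (text : Option String) (lang : String) : String :=
  match text with
  | none => ""
  | some t =>
    if t = "" then ""
    else
      let raw := t
      if lang ≠ "zh" then raw
      else
        let delimiter_positions := ([" - ", " | ", " (", ": "] : List String).map
          (fun token => PySem.Str.find raw token)
        let candidates := delimiter_positions.filter (fun position => decide (0 < position))
        let split_at : Int :=
          match PySem.List.min? candidates (fun x => x) with
          | some m => m
          | none => PySem.Str.len raw
        let name := PySem.Str.strip (PySem.Str.slice raw none (some split_at))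
        let localized := display_player_name name lang
        if localized = name then raw
        else localized ++ PySem.Str.slice raw (some split_at) none

-- ===== PORT B =====
def pvDelims : List String := [" - ", " | ", " (", ": "]

-- raw.startswith(_DELIMITERS, i) on the suffix starting at i
def pvStartsAny (s : List Char) : Bool := pvDelims.any (fun d => d.toList.isPrefixOf s)

-- the 'for i in range(1, len(raw)): … break' loop, walking the suffix
def pvScan (i : Nat) (s : List Char) (dflt : Nat) : Nat :=
  match s with
  | [] => dflt
  | c :: rest => if pvStartsAny (c :: rest) then i else pvScan (i + 1) rest dflt

def localize_player_line_alt (text : Option String) (lang : String) : String :=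
  match text with
  | none => ""
  | some raw =>
    if raw = "" then ""
    else if lang ≠ "zh" then raw
    else
      let L := raw.toList
      let split_at := pvScan 1 (L.drop 1) L.length
      let name := String.ofList (PySem.Chars.strip (L.take split_at))
      let localized := PySem.Dict.getD PLAYER_DISPLAY_ZH name name
      if localized = name then raw
      else localized ++ String.ofList (L.drop split_at)

-- ===== PRECONDITION & SPEC =====
def Spec_localize_player_line (text : Option String) (lang : String) (out : String) : Prop := out = localize_player_line_alt text lang
instance (text : Option String) (lang : String) (out : String) : Decidable (Spec_localize_player_line text lang out) := by unfold Spec_localize_player_line; infer_instance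

-- ===== CLAIM (what is proved, stated in full; the proofs are below) =====
def Claim_equal_localize_player_line : Prop := ∀ (text : Option String) (lang : String), Dom_localize_player_line text lang → Spec_localize_player_line text lang (localize_player_line text lang)


-- ===== LEMMAS AND PROOFS =====

-- basic strip facts ---------------------------------------------------------

theorem pv_dropWhile_head {p : Char → Bool} {l t : List Char} {c : Char}
    (h : List.dropWhile p l = c :: t) : p c = false := by
  induction l with
  | nil => simp at h
  | cons a l ih =>
    rw [List.dropWhile_cons] at h
    by_cases hp : p a = true
    · exact ih (by simpa [hp] using h)
    · simp [hp] at h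
      rcases h with ⟨rfl, -⟩
      simpa using hp

theorem pv_lstrip_cons_space {c : Char} {l : List Char}
    (h : PySem.Chars.isspace c = true) :
    PySem.Chars.lstrip (c :: l) = PySem.Chars.lstrip l := by
  simp [PySem.Chars.lstrip, h]

theorem pv_lstrip_cons_nonspace {c : Char} {l : List Char}
    (h : PySem.Chars.isspace c = false) :
    PySem.Chars.lstrip (c :: l) = c :: l := by
  simp [PySem.Chars.lstrip, h]

theorem pv_rstrip_cons {c : Char} {l : List Char}
    (h : PySem.Chars.isspace c = false) :
    PySem.Chars.rstrip (c :: l) = c :: PySem.Chars.rstrip l := by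
  unfold PySem.Chars.rstrip
  rw [List.reverse_cons, List.dropWhile_append]
  split_ifs with he
  · rw [List.isEmpty_iff] at he
    rw [he]
    simp [h]
  · simp

theorem pv_rstrip_idem (l : List Char) :
    PySem.Chars.rstrip (PySem.Chars.rstrip l) = PySem.Chars.rstrip l := by
  simp [PySem.Chars.rstrip, List.dropWhile_idempotent]

theorem pv_lstrip_head {l t : List Char} {c : Char}
    (h : PySem.Chars.lstrip l = c :: t) : PySem.Chars.isspace c = false :=
  pv_dropWhile_head h

theorem pv_strip_idem (l : List Char) :
    PySem.Chars.strip (PySem.Chars.strip l) = PySem.Chars.strip l := by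
  cases h : PySem.Chars.lstrip l with
  | nil =>
    have hnil : PySem.Chars.strip l = [] := by
      show PySem.Chars.rstrip (PySem.Chars.lstrip l) = []
      rw [h]
      rfl
    rw [hnil]
    rfl
  | cons c t =>
    have hc := pv_lstrip_head h
    show PySem.Chars.rstrip (PySem.Chars.lstrip (PySem.Chars.rstrip (PySem.Chars.lstrip l)))
        = PySem.Chars.rstrip (PySem.Chars.lstrip l)
    rw [h, pv_rstrip_cons hc, pv_lstrip_cons_nonspace hc, pv_rstrip_cons hc, pv_rstrip_idem]

-- the dictionary never contains a key that is empty or starts with a delimiter char ----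

theorem pv_items : PLAYER_DISPLAY_ZH.items = [
  ("Anthony Davis", "安东尼·戴维斯"),
  ("Anthony Edwards", "安东尼·爱德华兹"),
  ("Ausar Thompson", "奥萨尔·汤普森"),
  ("Brandon Miller", "布兰登·米勒"),
  ("Cade Cunningham", "凯德·坎宁安"),
  ("De'Aaron Fox", "达龙·福克斯"),
  ("DeMar DeRozan", "德玛尔·德罗赞"),
  ("Devin Vassell", "德文·瓦塞尔"),
  ("Domantas Sabonis", "多曼塔斯·萨博尼斯"),
  ("Donte DiVincenzo", "唐特·迪文琴佐"),
  ("Duncan Robinson", "邓肯·罗宾逊"),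
  ("Jalen Brunson", "杰伦·布伦森"),
  ("Jalen Duren", "杰伦·杜伦"),
  ("Jaylen Brown", "杰伦·布朗"),
  ("Jayson Tatum", "杰森·塔图姆"),
  ("Joel Embiid", "乔尔·恩比德"),
  ("Julius Randle", "朱利叶斯·兰德尔"),
  ("Karl-Anthony Towns", "卡尔-安东尼·唐斯"),
  ("LaMelo Ball", "拉梅洛·鲍尔"),
  ("LeBron James", "勒布朗·詹姆斯"),
  ("Malik Monk", "马利克·蒙克"),
  ("Mark Williams", "马克·威廉姆斯"),
  ("Miles Bridges", "迈尔斯·布里奇斯"),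
  ("Mike Conley", "迈克·康利"),
  ("OG Anunoby", "OG·阿奴诺比"),
  ("Paul George", "保罗·乔治"),
  ("Rudy Gobert", "鲁迪·戈贝尔"),
  ("Stephen Curry", "斯蒂芬·库里"),
  ("Stephon Castle", "斯蒂芬·卡斯尔"),
  ("Tobias Harris", "托拜厄斯·哈里斯"),
  ("Tyrese Maxey", "泰瑞斯·马克西"),
  ("Victor Wembanyama", "维克托·文班亚马")] := by decide

theorem pv_zh_getD_self (k : String)
    (h : ∀ c, k.toList.head? = some c → c = '-' ∨ c = '|' ∨ c = '(' ∨ c = ':') :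
    PySem.Dict.getD PLAYER_DISPLAY_ZH k k = k := by
  have hf : List.find? (fun p => p.1 == k) (PLAYER_DISPLAY_ZH.items) = none := by
    rw [pv_items, List.find?_eq_none]
    intro x hx
    simp only [beq_iff_eq]
    have hne : x.1.toList.head? ≠ k.toList.head? := by
      cases hk : k.toList.head? with
      | none => fin_cases hx <;> simp
      | some c =>
        rcases h c hk with rfl | rfl | rfl | rfl <;> fin_cases hx <;> decide
    intro heq
    apply hne
    rw [heq]
  simp [PySem.Dict.getD, PySem.Dict.get?, hf]

-- shape of strip (take m L) when a delimiter sits at position 0 --------------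

theorem pv_striptake_space {c2 : Char} {rest : List Char} (m : Nat)
    (hc2 : PySem.Chars.isspace c2 = false) :
    PySem.Chars.strip ((' ' :: c2 :: rest).take m) = [] ∨
    ∃ t, PySem.Chars.strip ((' ' :: c2 :: rest).take m) = c2 :: t := by
  match m with
  | 0 => exact Or.inl rfl
  | 1 => exact Or.inl rfl
  | (n + 2) =>
    right
    show ∃ t, PySem.Chars.rstrip (PySem.Chars.lstrip (' ' :: c2 :: rest.take n)) = c2 :: t
    rw [pv_lstrip_cons_space (by decide), pv_lstrip_cons_nonspace hc2, pv_rstrip_cons hc2]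
    exact ⟨_, rfl⟩

theorem pv_striptake_colon {rest : List Char} (m : Nat) :
    PySem.Chars.strip ((':' :: rest).take m) = [] ∨
    ∃ t, PySem.Chars.strip ((':' :: rest).take m) = ':' :: t := by
  match m with
  | 0 => exact Or.inl rfl
  | (n + 1) =>
    right
    show ∃ t, PySem.Chars.rstrip (PySem.Chars.lstrip (':' :: rest.take n)) = ':' :: t
    rw [pv_lstrip_cons_nonspace (by decide), pv_rstrip_cons (by decide)]
    exact ⟨_, rfl⟩

-- the dict lookup is the identity on such a name ------------------------------

theorem pv_name_fix (L : List Char) (h0 : pvStartsAny L = true) (m : Nat) :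
    PySem.Dict.getD PLAYER_DISPLAY_ZH (String.ofList (PySem.Chars.strip (L.take m)))
      (String.ofList (PySem.Chars.strip (L.take m)))
    = String.ofList (PySem.Chars.strip (L.take m)) := by
  have hpre : ∃ d ∈ pvDelims, d.toList <+: L := by
    simpa [pvStartsAny, List.any_eq_true, List.isPrefixOf_iff_prefix] using h0
  apply pv_zh_getD_self
  intro c hc
  simp only [String.toList_ofList] at hc
  obtain ⟨d, hd, hpre⟩ := hpre
  obtain ⟨r, hr⟩ := hpre
  fin_cases hd <;> simp only [] at hr
  · -- " - "
    have := pv_striptake_space (c2 := '-') (rest := ' ' :: r) m (by decide)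
    rw [show (' ' :: '-' :: ' ' :: r : List Char) = " - ".toList ++ r from rfl] at this
    rw [hr] at this
    rcases this with h | ⟨t, h⟩ <;> rw [h] at hc <;> simp at hc
    tauto
  · -- " | "
    have := pv_striptake_space (c2 := '|') (rest := ' ' :: r) m (by decide)
    rw [show (' ' :: '|' :: ' ' :: r : List Char) = " | ".toList ++ r from rfl] at this
    rw [hr] at this
    rcases this with h | ⟨t, h⟩ <;> rw [h] at hc <;> simp at hc
    tauto
  · -- " ("
    have := pv_striptake_space (c2 := '(') (rest := r) m (by decide)
    rw [show (' ' :: '(' :: r : List Char) = " (".toList ++ r from rfl] at this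
    rw [hr] at this
    rcases this with h | ⟨t, h⟩ <;> rw [h] at hc <;> simp at hc
    tauto
  · -- ": "
    have := pv_striptake_colon (rest := ' ' :: r) m
    rw [show (':' :: ' ' :: r : List Char) = ": ".toList ++ r from rfl] at this
    rw [hr] at this
    rcases this with h | ⟨t, h⟩ <;> rw [h] at hc <;> simp at hc
    tauto

-- display_player_name is getD on an already-stripped name ---------------------

theorem pv_strip_ofList_strip (w : List Char) :
    PySem.Str.strip (String.ofList (PySem.Chars.strip w)) = String.ofList (PySem.Chars.strip w) := by
  simp [PySem.Str.strip, String.toList_ofList, pv_strip_idem]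

theorem pv_display_eq_getD (w : List Char) :
    display_player_name (String.ofList (PySem.Chars.strip w)) "zh"
    = PySem.Dict.getD PLAYER_DISPLAY_ZH (String.ofList (PySem.Chars.strip w))
        (String.ofList (PySem.Chars.strip w)) := by
  by_cases hnm : String.ofList (PySem.Chars.strip w) = ""
  · rw [hnm]
    have : PySem.Dict.getD PLAYER_DISPLAY_ZH "" "" = "" :=
      pv_zh_getD_self "" (by intro c hc; simp at hc)
    simp [display_player_name, this]
  · simp only [display_player_name, if_neg hnm]
    rw [pv_strip_ofList_strip]
    simp

-- scan characterisation -------------------------------------------------------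

theorem pv_scan_none (s : List Char) (i d : Nat)
    (h : ∀ k, k < s.length → pvStartsAny (s.drop k) = false) : pvScan i s d = d := by
  induction s generalizing i with
  | nil => rfl
  | cons c rest ih =>
    have h0 : pvStartsAny (c :: rest) = false := by simpa using h 0 (by simp)
    show (if pvStartsAny (c :: rest) = true then i else pvScan (i + 1) rest d) = d
    rw [if_neg (by simp [h0])]
    exact ih (i + 1) (fun k hk => by simpa using h (k + 1) (by simpa using hk))

theorem pv_scan_found (s : List Char) (i d j : Nat)
    (hj : j < s.length) (hmatch : pvStartsAny (s.drop j) = true)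
    (hmin : ∀ k, k < j → pvStartsAny (s.drop k) = false) : pvScan i s d = i + j := by
  induction s generalizing i j with
  | nil => simp at hj
  | cons c rest ih =>
    cases j with
    | zero =>
      show (if pvStartsAny (c :: rest) = true then i else pvScan (i + 1) rest d) = i + 0
      rw [if_pos (by simpa using hmatch)]
      omega
    | succ j' =>
      have h0 : pvStartsAny (c :: rest) = false := by simpa using hmin 0 (Nat.succ_pos _)
      show (if pvStartsAny (c :: rest) = true then i else pvScan (i + 1) rest d) = i + (j' + 1)
      rw [if_neg (by simp [h0])]
      have := ih (i + 1) j' (by simpa using hj) (by simpa using hmatch)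
        (fun k hk => by simpa using hmin (k + 1) (by omega))
      omega

-- find facts ------------------------------------------------------------------

theorem pv_occ_find {L : List Char} {t : List Char} (k : Nat) (hpre : t <+: L.drop k) :
    0 ≤ PySem.Chars.find L t ∧ PySem.Chars.find L t ≤ (k : Int) := by
  have hinf : t <:+: L := hpre.isInfix.trans (List.drop_suffix k L).isInfix
  have h0 : 0 ≤ PySem.Chars.find L t := (PySem.Chars.find_nonneg_iff L t).mpr hinf
  refine ⟨h0, ?_⟩
  by_contra hgt
  rw [not_le] at hgt
  have hk : k < (PySem.Chars.find L t).toNat := by omega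
  exact (PySem.Chars.find_spec h0).2 k hk hpre

theorem pv_find_pos {L : List Char} {t : String}
    (h0 : pvStartsAny L = false) (ht : t ∈ pvDelims)
    (hnonneg : 0 ≤ PySem.Chars.find L t.toList) : 0 < PySem.Chars.find L t.toList := by
  rcases lt_or_eq_of_le hnonneg with h | h
  · exact h
  · exfalso
    have hpre : t.toList <+: L := by
      have := (PySem.Chars.find_spec hnonneg).1
      rwa [← h, Int.toNat_zero, List.drop_zero] at this
    have : pvStartsAny L = true := by
      simp only [pvStartsAny, List.any_eq_true]
      exact ⟨t, ht, List.isPrefixOf_iff_prefix.mpr hpre⟩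
    simp [this] at h0

theorem pv_delims_nonempty : ∀ t ∈ pvDelims, t.toList ≠ [] := by decide

-- the two split positions agree when no delimiter sits at position 0 ----------

theorem pv_split_eq (raw : String) (h0 : pvStartsAny raw.toList = false) :
    (match PySem.List.min?
        (((([" - ", " | ", " (", ": "] : List String).map
            (fun token => PySem.Str.find raw token)).filter
          (fun position => decide (0 < position)))) (fun x => x) with
     | some m => m
     | none => PySem.Str.len raw)
    = ((pvScan 1 (raw.toList.drop 1) raw.toList.length : Nat) : Int) := by
  set L := raw.toList with hL
  have hfindeq : ∀ t : String, PySem.Str.find raw t = PySem.Chars.find L t.toList := fun t => rfl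
  cases hmin : PySem.List.min?
      (((([" - ", " | ", " (", ": "] : List String).map
          (fun token => PySem.Str.find raw token)).filter
        (fun position => decide (0 < position)))) (fun x => x) with
  | none =>
    have hnil := (PySem.List.min?_eq_none_iff _ _).mp hmin
    have hcand : ∀ t ∈ ([" - ", " | ", " (", ": "] : List String),
        ¬ (0 < PySem.Chars.find L t.toList) := by
      intro t ht hpos
      have : PySem.Str.find raw t ∈
          ((([" - ", " | ", " (", ": "] : List String).map
            (fun token => PySem.Str.find raw token)).filter
          (fun position => decide (0 < position))) := by
        rw [List.mem_filter]
        exact ⟨List.mem_map_of_mem ht, by simpa [hfindeq] using hpos⟩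
      rw [hnil] at this
      simp at this
    have hscan : pvScan 1 (L.drop 1) L.length = L.length := by
      apply pv_scan_none
      intro k hk
      by_contra hANY
      rw [Bool.not_eq_false] at hANY
      rw [List.drop_drop] at hANY
      obtain ⟨t, ht, hpre⟩ := by
        simpa [pvStartsAny, List.any_eq_true, List.isPrefixOf_iff_prefix] using hANY
      obtain ⟨hge, hle⟩ := pv_occ_find (1 + k) hpre
      have hpos := pv_find_pos h0 (by simpa [pvDelims] using ht) hge
      exact hcand t (by simpa [pvDelims] using ht) hpos
    rw [hscan]
    simp [PySem.Str.len, hL]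
  | some m =>
    have hmem := PySem.List.min?_mem hmin
    rw [List.mem_filter] at hmem
    obtain ⟨hmap, hposd⟩ := hmem
    have hpos : 0 < m := by simpa using hposd
    obtain ⟨t0, ht0, hfind⟩ := List.mem_map.mp hmap
    rw [hfindeq] at hfind
    have hnonneg : (0:Int) ≤ m := le_of_lt hpos
    have hspec := PySem.Chars.find_spec (s := L) (sub := t0.toList) (by rw [hfind]; exact hnonneg)
    rw [hfind] at hspec
    have hlen : m.toNat < L.length := by
      by_contra hge
      rw [not_lt] at hge
      have : L.drop m.toNat = [] := List.drop_eq_nil_of_le hge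
      rw [this] at hspec
      exact pv_delims_nonempty t0 (by simpa [pvDelims] using ht0)
        (List.prefix_nil.mp hspec.1)
    have honem : 1 ≤ m.toNat := by omega
    have hscan : pvScan 1 (L.drop 1) L.length = 1 + (m.toNat - 1) := by
      apply pv_scan_found
      · simp only [List.length_drop]
        omega
      · rw [List.drop_drop, show 1 + (m.toNat - 1) = m.toNat from by omega]
        simp only [pvStartsAny, List.any_eq_true]
        exact ⟨t0, by simpa [pvDelims] using ht0, List.isPrefixOf_iff_prefix.mpr hspec.1⟩
      · intro k hk
        by_contra hANY
        rw [Bool.not_eq_false] at hANY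
        rw [List.drop_drop] at hANY
        obtain ⟨t, ht, hpre⟩ := by
          simpa [pvStartsAny, List.any_eq_true, List.isPrefixOf_iff_prefix] using hANY
        obtain ⟨hge, hle⟩ := pv_occ_find (1 + k) hpre
        have hposf := pv_find_pos h0 (by simpa [pvDelims] using ht) hge
        have hmemf : PySem.Chars.find L t.toList ∈
            ((([" - ", " | ", " (", ": "] : List String).map
              (fun token => PySem.Str.find raw token)).filter
            (fun position => decide (0 < position))) := by
          rw [List.mem_filter]
          refine ⟨?_, by simpa using hposf⟩
          rw [List.mem_map]
          exact ⟨t, by simpa [pvDelims] using ht, (hfindeq t).symm ▸ rfl⟩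
        have hminle := PySem.List.min?_isMin hmin _ hmemf
        simp only [] at hminle
        have : ((k + 1 : Nat) : Int) < m := by
          have : (k + 1 : Nat) < m.toNat := by omega
          omega
        omega
    rw [hscan]
    show m = ((1 + (m.toNat - 1) : Nat) : Int)
    omega

-- assembling the two sides ----------------------------------------------------

def pvCands (raw : String) : List Int :=
  (([" - ", " | ", " (", ": "] : List String).map
      (fun token => PySem.Str.find raw token)).filter (fun position => decide (0 < position))

def pvSplitA (raw : String) : Int :=
  match PySem.List.min? (pvCands raw) (fun x => x) with
  | some m => m
  | none => PySem.Str.len raw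

theorem pv_splitA_nonneg (raw : String) : 0 ≤ pvSplitA raw := by
  unfold pvSplitA
  cases hm : PySem.List.min? (pvCands raw) (fun x => x) with
  | none => exact Int.natCast_nonneg _
  | some m =>
    have hmem := PySem.List.min?_mem hm
    unfold pvCands at hmem
    rw [List.mem_filter] at hmem
    have : 0 < m := by simpa using hmem.2
    show (0 : Int) ≤ m
    omega

theorem pv_nameA (raw : String) (sa : Int) (hsa : 0 ≤ sa) :
    PySem.Str.strip (PySem.Str.slice raw none (some sa))
    = String.ofList (PySem.Chars.strip (raw.toList.take sa.toNat)) := by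
  have hslice : PySem.Str.slice raw none (some sa) = String.ofList (raw.toList.take sa.toNat) := by
    show String.ofList (PySem.Chars.slice raw.toList none (some sa)) = _
    rw [PySem.Chars.slice_eq_listSlice, PySem.List.slice_to _ hsa]
  rw [hslice]
  show String.ofList (PySem.Chars.strip (String.ofList _).toList) = _
  rw [String.toList_ofList]

theorem pv_tailA (raw : String) (sa : Int) (hsa : 0 ≤ sa) :
    PySem.Str.slice raw (some sa) none = String.ofList (raw.toList.drop sa.toNat) := by
  show String.ofList (PySem.Chars.slice raw.toList (some sa) none) = _
  rw [PySem.Chars.slice_eq_listSlice, PySem.List.slice_from _ hsa]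

theorem pv_branch (raw : String) (sa : Int) (sb : Nat) (hsa : 0 ≤ sa)
    (heq : sa.toNat = sb ∨ pvStartsAny raw.toList = true) :
    (if display_player_name (PySem.Str.strip (PySem.Str.slice raw none (some sa))) "zh"
        = PySem.Str.strip (PySem.Str.slice raw none (some sa))
     then raw
     else display_player_name (PySem.Str.strip (PySem.Str.slice raw none (some sa))) "zh"
          ++ PySem.Str.slice raw (some sa) none)
    = (if PySem.Dict.getD PLAYER_DISPLAY_ZH (String.ofList (PySem.Chars.strip (raw.toList.take sb)))
           (String.ofList (PySem.Chars.strip (raw.toList.take sb)))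
         = String.ofList (PySem.Chars.strip (raw.toList.take sb))
       then raw
       else PySem.Dict.getD PLAYER_DISPLAY_ZH (String.ofList (PySem.Chars.strip (raw.toList.take sb)))
              (String.ofList (PySem.Chars.strip (raw.toList.take sb)))
            ++ String.ofList (raw.toList.drop sb)) := by
  rw [pv_nameA raw sa hsa, pv_display_eq_getD, pv_tailA raw sa hsa]
  rcases heq with heq | h0
  · rw [heq]
  · rw [pv_name_fix raw.toList h0 sa.toNat, pv_name_fix raw.toList h0 sb]
    simp

theorem pv_core (raw : String) (hraw : ¬ raw = "") :
    localize_player_line (some raw) "zh" = localize_player_line_alt (some raw) "zh" := by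
  have hzh : ¬ (("zh" : String) ≠ "zh") := by simp
  show (if raw = "" then "" else _) = (if raw = "" then "" else _)
  rw [if_neg hraw, if_neg hraw, if_neg hzh, if_neg hzh]
  by_cases h0 : pvStartsAny raw.toList = true
  · exact pv_branch raw (pvSplitA raw) (pvScan 1 (raw.toList.drop 1) raw.toList.length)
      (pv_splitA_nonneg raw) (Or.inr h0)
  · have hB : pvSplitA raw
        = ((pvScan 1 (raw.toList.drop 1) raw.toList.length : Nat) : Int) :=
      pv_split_eq raw (by simpa using h0)
    have heq : (pvSplitA raw).toNat = pvScan 1 (raw.toList.drop 1) raw.toList.length := by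
      rw [hB]
      exact Int.toNat_natCast _
    exact pv_branch raw (pvSplitA raw) (pvScan 1 (raw.toList.drop 1) raw.toList.length)
      (pv_splitA_nonneg raw) (Or.inl heq)

-- ===== VERDICT (by name: the statement is the Claim_ definition above) =====
theorem localize_player_line_spec : Claim_equal_localize_player_line := by
  intro text lang _
  unfold Spec_localize_player_line
  cases text with
  | none => rfl
  | some raw =>
    by_cases hraw : raw = ""
    · simp [localize_player_line, localize_player_line_alt, hraw]
    · by_cases hlang : lang = "zh"
      · rw [hlang]
        exact pv_core raw hraw
      · show (if raw = "" then "" else _) = (if raw = "" then "" else _)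
        rw [if_neg hraw, if_neg hraw, if_pos (by simpa using hlang), if_pos (by simpa using hlang)]
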